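-- pv_equiv track=rewrite | github.com/srth12/Eclipse-Workspace- | Coding Practice/codingpractice/src/main/java/com/hackerrank/test/Smart News/test1.py | get_max_switching_array
-- ===== SOURCE A (Python) =====
-- def get_max_switching_array(A):
--     if is_switching(A):
--         return A
--     right = A[1:]
--     left = A[:-1]
--     right_array = get_max_switching_array(right)
--     left_array = get_max_switching_array(left)
--     if len(right_array) > len(left_array):
--         return right_array
--     else:
--         return left_array
--
-- def is_switching(A):
--     odd_dig = A[0]
--     even_dig = A[1]
--     for idx in range(len(A)):
--         if idx % 2 == 0:
--             if odd_dig != A[idx]: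
--                 return False
--         else:
--             if even_dig != A[idx]:
--                 return False
--
--     return True
-- ===== SOURCE B (Python) =====
-- def get_max_switching_array(A):
--     # One backward pass over start positions, O(n^2) total instead of A's O(2^n) recursion.
--     n = len(A)
--     best = []
--     for s in range(n - 1, -1, -1):
--         k = min(n - s, 2)              # longest switching run starting at s
--         while s + k < n and A[s + k] == A[s + k - 2]:
--             k += 1
--         if k >= len(best):             # ties -> the more-left (current) candidate
--             best = A[s:s + k]
--     return best
-- ===== Notes on version B (the rewrite author's own statement) =====
-- stated objective: faster
-- what changed: Replaces A's exponential branching recursion (trim one element from each end and recurse on both) with a single backward pass over start positions that extends each period-2 switching run directly and keeps the leftmost longest one.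
import Mathlib
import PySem

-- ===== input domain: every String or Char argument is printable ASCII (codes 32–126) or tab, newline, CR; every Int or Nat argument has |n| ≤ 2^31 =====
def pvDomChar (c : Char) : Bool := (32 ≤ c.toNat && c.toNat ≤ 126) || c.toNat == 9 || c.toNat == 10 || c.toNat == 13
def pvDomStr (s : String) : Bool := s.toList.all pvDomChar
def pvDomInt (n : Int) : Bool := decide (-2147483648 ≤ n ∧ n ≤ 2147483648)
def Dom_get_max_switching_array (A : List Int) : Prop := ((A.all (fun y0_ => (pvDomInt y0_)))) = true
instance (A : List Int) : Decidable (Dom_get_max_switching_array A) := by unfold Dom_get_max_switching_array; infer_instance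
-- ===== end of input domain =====

-- B replaces A's exponential two-sided trimming recursion by one linear-time-per-start backward
-- scan that extends each period-2 switching run directly; same return value on length ≥ 2.

-- ===== PORT A =====
-- is_switching: Python reads A[0] and A[1] (raising IndexError iff len(A) < 2 — that case is
-- handled by the `length < 2` guard at the call site below and excluded by Pre_); the idx-loop
-- with its early `return False` is the `all` over range(len(A)), comparing even positions with
-- A[0] and odd positions with A[1].
def a_is_switching (A : List Int) : Bool :=
  let odd_dig := A.getD 0 0
  let even_dig := A.getD 1 0
  (List.range A.length).all (fun idx =>
    if idx % 2 = 0 then odd_dig == A.getD idx 0 else even_dig == A.getD idx 0)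

def get_max_switching_array (A : List Int) : List Int :=
  if A.length < 2 then []
  else if a_is_switching A then A
  else
    let right := PySem.List.slice A (some 1) none
    let left := PySem.List.slice A none (some (-1))
    let right_array := get_max_switching_array right
    let left_array := get_max_switching_array left
    if right_array.length > left_array.length then right_array else left_array
termination_by A.length
decreasing_by
  · rw [PySem.List.slice_from_one]; simp [List.length_tail]; omega
  · rw [PySem.List.slice_to_neg_one]; simp [List.length_dropLast]; omega

-- ===== PORT B =====
-- Source B's inner while-loop: k = min(remaining, 2), then k += 1 while A[s+k] == A[s+k-2];
-- b_run l is that final k for the run starting at the head of l.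
def b_run : List Int → Nat
  | a :: b :: c :: t => if a = c then b_run (b :: c :: t) + 1 else 2
  | l => l.length

def get_max_switching_array_alt : List Int → List Int
  | [] => []
  | a :: t =>
    let rest := get_max_switching_array_alt t
    let cur := (a :: t).take (b_run (a :: t))
    if cur.length ≥ rest.length then cur else rest


-- ===== PRECONDITION & SPEC =====
-- Pre_: Python's A raises IndexError (A[1] in is_switching) exactly on lists of length < 2.
def Pre_get_max_switching_array (A : List Int) : Prop := 2 ≤ A.length
instance (A : List Int) : Decidable (Pre_get_max_switching_array A) := by
  unfold Pre_get_max_switching_array; infer_instance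

def pvWitness_get_max_switching_array : List Int := [1, 2, 1]

def Spec_get_max_switching_array (A : List Int) (out : List Int) : Prop :=
  out = get_max_switching_array_alt A
instance (A : List Int) (out : List Int) : Decidable (Spec_get_max_switching_array A out) := by
  unfold Spec_get_max_switching_array; infer_instance

-- ===== CLAIM (what is proved, stated in full; the proofs are below) =====
def Claim_equal_get_max_switching_array : Prop :=
  ∀ (A : List Int), Dom_get_max_switching_array A → Pre_get_max_switching_array A →
    Spec_get_max_switching_array A (get_max_switching_array A)

-- ===== LEMMAS AND PROOFS =====

theorem list_ind3 (P : List Int → Prop) (h0 : P []) (h1 : ∀ a, P [a]) (h2 : ∀ a b, P [a, b])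
    (h3 : ∀ a b c t, P (b :: c :: t) → P (a :: b :: c :: t)) : ∀ l, P l := by
  intro l
  induction hn : l.length using Nat.strong_induction_on generalizing l with
  | _ n ih =>
      match l, hn with
      | [], _ => exact h0
      | [a], _ => exact h1 a
      | [a, b], _ => exact h2 a b
      | a :: b :: c :: t, hn => exact h3 a b c t (ih (b :: c :: t).length (by simp at hn ⊢; omega) _ rfl)

theorem b_run_le (l : List Int) : b_run l ≤ l.length := by
  induction l using list_ind3 with
  | h3 a b c t ih => simp only [b_run]; split <;> simp_all <;> omega
  | _ => simp [b_run]

theorem alt_cons (a : Int) (t : List Int) :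
    get_max_switching_array_alt (a :: t) =
      if (get_max_switching_array_alt t).length ≤ b_run (a :: t)
      then (a :: t).take (b_run (a :: t)) else get_max_switching_array_alt t := by
  simp only [get_max_switching_array_alt, List.length_take, Nat.min_eq_left (b_run_le (a :: t)), ge_iff_le]

theorem alt_length_cons (a : Int) (t : List Int) :
    (get_max_switching_array_alt (a :: t)).length = max (b_run (a :: t)) (get_max_switching_array_alt t).length := by
  have h := b_run_le (a :: t)
  rw [alt_cons]
  rcases Nat.lt_or_ge (b_run (a :: t)) (get_max_switching_array_alt t).length with hlt | hle
  · rw [if_neg (by omega)]; omega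
  · rw [if_pos hle]; simp only [List.length_take, List.length_cons] at h ⊢; omega

theorem alt_length_le (l : List Int) : (get_max_switching_array_alt l).length ≤ l.length := by
  induction l with
  | nil => simp [get_max_switching_array_alt]
  | cons a t ih =>
      rw [alt_length_cons]
      have h := b_run_le (a :: t)
      simp only [List.length_cons] at h ⊢
      omega

theorem alt_of_full (l : List Int) (h : b_run l = l.length) : get_max_switching_array_alt l = l := by
  cases l with
  | nil => rfl
  | cons a t =>
      have ht := alt_length_le t
      rw [alt_cons, h, if_pos (by simp at ht ⊢; omega), List.take_length]

theorem b_run_dropLast (l : List Int) :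
    b_run l.dropLast = min (b_run l) (l.length - 1) := by
  induction l using list_ind3 with
  | h0 => simp [b_run]
  | h1 a => simp [b_run]
  | h2 a b => simp [b_run]
  | h3 a b c t ih =>
      cases t with
      | nil => by_cases h : a = c <;> simp [b_run, h]
      | cons d u =>
          rw [show (a :: b :: c :: d :: u).dropLast = a :: b :: c :: (d :: u).dropLast from rfl]
          rw [show (b :: c :: d :: u).dropLast = b :: c :: (d :: u).dropLast from rfl] at ih
          by_cases h : a = c
          · rw [b_run, if_pos h, b_run, if_pos h, ih]
            simp [b_run]
          · rw [b_run, if_neg h, b_run, if_neg h]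
            simp

theorem take_dropLast_eq (l : List Int) (k : Nat) (h : k ≤ l.length - 1) :
    l.dropLast.take k = l.take k := by
  rw [List.dropLast_eq_take, List.take_take]
  congr 1
  omega

theorem alt_dropLast_le (t : List Int) :
    (get_max_switching_array_alt t.dropLast).length ≤ (get_max_switching_array_alt t).length := by
  induction t with
  | nil => simp
  | cons a t ih =>
      cases t with
      | nil => simp [get_max_switching_array_alt]
      | cons b u =>
          rw [show (a :: b :: u).dropLast = a :: (b :: u).dropLast from rfl,
              alt_length_cons, alt_length_cons]
          have h1 := b_run_dropLast (a :: b :: u)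
          rw [show (a :: b :: u).dropLast = a :: (b :: u).dropLast from rfl] at h1
          omega

theorem alt_dropLast_eq (t : List Int)
    (h : (get_max_switching_array_alt t.dropLast).length = (get_max_switching_array_alt t).length) : get_max_switching_array_alt t.dropLast = get_max_switching_array_alt t := by
  induction t with
  | nil => rfl
  | cons a t' ih =>
      cases t' with
      | nil => simp [get_max_switching_array_alt, b_run] at h
      | cons b u =>
          have hne : (b :: u) ≠ [] := by simp
          set t' := b :: u with ht'
          have hdl : (a :: t').dropLast = a :: t'.dropLast := by rw [ht']; rfl
          have hbr : b_run (a :: t'.dropLast) = min (b_run (a :: t')) ((a :: t').length - 1) := by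
            rw [← hdl]; exact b_run_dropLast (a :: t')
          have hM' := alt_length_le t'
          have hMd := alt_dropLast_le t'
          have hc := b_run_le (a :: t')
          have hlen : (a :: t').length = t'.length + 1 := rfl
          rw [hdl, alt_length_cons, alt_length_cons] at h
          by_cases hcase : (get_max_switching_array_alt t').length ≤ b_run (a :: t')
          · by_cases hfull : b_run (a :: t') = (a :: t').length
            · exfalso
              have hMd2 : (get_max_switching_array_alt t'.dropLast).length ≤ t'.length - 1 :=
                le_trans (alt_length_le _) (by simp [List.length_dropLast])
              omega
            · have hcc : b_run (a :: t'.dropLast) = b_run (a :: t') := by omega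
              rw [hdl, alt_cons, alt_cons, hcc]
              rw [if_pos (by omega), if_pos (by omega)]
              rw [show a :: t'.dropLast = (a :: t').dropLast from hdl.symm]
              exact take_dropLast_eq (a :: t') _ (by omega)
          · push_neg at hcase
            have hcc : b_run (a :: t'.dropLast) = b_run (a :: t') := by omega
            have hMd' : (get_max_switching_array_alt t'.dropLast).length = (get_max_switching_array_alt t').length := by omega
            have hrec := ih hMd'
            rw [hdl, alt_cons, alt_cons, hcc]
            rw [if_neg (by omega), if_neg (by omega)]
            exact hrec

theorem alt_step (a : Int) (t' : List Int) (h2 : t' ≠ [])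
    (hc : b_run (a :: t') < (a :: t').length) :
    get_max_switching_array_alt (a :: t') =
      (if (get_max_switching_array_alt t').length > (get_max_switching_array_alt ((a :: t').dropLast)).length
       then get_max_switching_array_alt t' else get_max_switching_array_alt ((a :: t').dropLast)) := by
  have hdl : (a :: t').dropLast = a :: t'.dropLast := by
    cases t' with | nil => exact absurd rfl h2 | cons x y => rfl
  have hbr : b_run (a :: t'.dropLast) = min (b_run (a :: t')) ((a :: t').length - 1) := by
    rw [← hdl]; exact b_run_dropLast (a :: t')
  have hcc : b_run (a :: t'.dropLast) = b_run (a :: t') := by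
    simp only [List.length_cons] at hbr hc ⊢; omega
  have hM' := alt_length_le t'
  have hMd := alt_dropLast_le t'
  have hlen : (a :: t').length = t'.length + 1 := rfl
  have htake : (a :: t'.dropLast).take (b_run (a :: t')) = (a :: t').take (b_run (a :: t')) := by
    rw [← hdl]; exact take_dropLast_eq (a :: t') _ (by simp only [List.length_cons] at hc ⊢; omega)
  by_cases hwin : (get_max_switching_array_alt t').length ≤ b_run (a :: t')
  · have hMdL : (get_max_switching_array_alt ((a :: t').dropLast)).length = b_run (a :: t') := by
      rw [hdl, alt_length_cons, hcc]; omega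
    rw [if_neg (by omega)]
    rw [alt_cons, if_pos hwin, hdl, alt_cons, hcc, if_pos (by omega), htake]
  · push_neg at hwin
    rw [alt_cons, if_neg (by omega)]
    by_cases hsub : (get_max_switching_array_alt t'.dropLast).length ≤ b_run (a :: t')
    · have hrhs : (get_max_switching_array_alt ((a :: t').dropLast)).length = b_run (a :: t') := by
        rw [hdl, alt_length_cons, hcc]; omega
      rw [if_pos (by omega)]
    · push_neg at hsub
      have hrhs : get_max_switching_array_alt ((a :: t').dropLast) = get_max_switching_array_alt t'.dropLast := by
        rw [hdl, alt_cons, hcc, if_neg (by omega)]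
      rw [hrhs]
      by_cases hgt : (get_max_switching_array_alt t'.dropLast).length < (get_max_switching_array_alt t').length
      · rw [if_pos hgt]
      · push_neg at hgt
        rw [if_neg (by omega), alt_dropLast_eq t' (by omega)]

def alt2 : Int → Int → List Int → Bool
  | _, _, [] => true
  | a, b, x :: t => (a == x) && alt2 b a t

theorem a_is_switching_eq_alt2 (A : List Int) (a b : Int) :
    (List.range A.length).all (fun idx =>
        if idx % 2 = 0 then a == A.getD idx 0 else b == A.getD idx 0) = alt2 a b A := by
  induction A generalizing a b with
  | nil => simp [alt2]
  | cons x T ih =>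
      rw [show (x :: T).length = T.length + 1 from rfl, List.range_succ_eq_map]
      simp only [List.all_cons, List.all_map]
      rw [if_pos (by norm_num)]
      have hf : ((fun idx => if idx % 2 = 0 then a == (x :: T).getD idx 0
                  else b == (x :: T).getD idx 0) ∘ Nat.succ) =
          (fun idx => if idx % 2 = 0 then b == T.getD idx 0 else a == T.getD idx 0) := by
        funext i
        rcases Nat.mod_two_eq_zero_or_one i with h | h <;>
          simp [Function.comp, Nat.succ_mod_two_eq_zero_iff, Nat.succ_mod_two_eq_one_iff, h]
      rw [hf, ih b a]
      rfl

theorem alt2_eq_b_run : ∀ (t : List Int) (a b : Int),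
    alt2 a b (a :: b :: t) = decide (b_run (a :: b :: t) = t.length + 2) := by
  intro t
  induction t with
  | nil => intro a b; simp [alt2, b_run]
  | cons c u ih =>
      intro a b
      by_cases hac : a = c
      · subst hac
        rw [show alt2 a b (a :: b :: a :: u) = alt2 b a (b :: a :: u) from by simp [alt2]]
        rw [ih b a]
        rw [show b_run (a :: b :: a :: u) = b_run (b :: a :: u) + 1 from by simp [b_run]]
        simp only [decide_eq_decide, List.length_cons]
        omega
      · rw [show alt2 a b (a :: b :: c :: u) = false from by
            simp [alt2]; intro h; exact absurd h hac]
        rw [show b_run (a :: b :: c :: u) = 2 from by simp [b_run, hac]]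
        simp only [List.length_cons]
        simp

theorem a_is_switching_iff (a b : Int) (t : List Int) :
    a_is_switching (a :: b :: t) = decide (b_run (a :: b :: t) = (a :: b :: t).length) := by
  simp only [a_is_switching]
  rw [show (a :: b :: t).getD 0 0 = a from rfl, show (a :: b :: t).getD 1 0 = b from rfl]
  rw [a_is_switching_eq_alt2 (a :: b :: t) a b, alt2_eq_b_run t a b]
  rfl

theorem b_run_ge_two : ∀ l : List Int, 2 ≤ l.length → 2 ≤ b_run l := by
  intro l
  induction l using list_ind3 with
  | h0 => intro h; simp at h
  | h1 a => intro h; simp at h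
  | h2 a b => intro _; simp [b_run]
  | h3 a b c t ih =>
      intro _
      simp only [b_run]
      split
      · have := ih (by simp)
        omega
      · omega

theorem main_aux (n : Nat) : ∀ l : List Int, l.length ≤ n → 2 ≤ l.length →
    get_max_switching_array l = get_max_switching_array_alt l := by
  induction n with
  | zero => intro l h1 h2; omega
  | succ n ih =>
      intro l h1 h2
      match l, h1, h2 with
      | a :: b :: t, h1, _ =>
          rw [get_max_switching_array]
          rw [if_neg (by simp)]
          rw [a_is_switching_iff]
          by_cases hsw : b_run (a :: b :: t) = (a :: b :: t).length
          · rw [if_pos (by simp [hsw])]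
            exact (alt_of_full _ hsw).symm
          · rw [if_neg (by simpa using hsw)]
            have hle := b_run_le (a :: b :: t)
            have hge2 := b_run_ge_two (a :: b :: t) (by simp)
            have hlen3 : 3 ≤ (a :: b :: t).length := by
              rcases t with _ | ⟨c, u⟩
              · exact absurd rfl hsw
              · simp
            rw [PySem.List.slice_from_one, PySem.List.slice_to_neg_one]
            simp only []
            rw [show (a :: b :: t).tail = b :: t from rfl]
            have hlt : (b :: t).length ≤ n := by simp only [List.length_cons] at h1 ⊢; omega
            have hlt2 : 2 ≤ (b :: t).length := by simp only [List.length_cons] at hlen3 ⊢; omega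
            have hld : ((a :: b :: t).dropLast).length ≤ n := by
              rw [List.length_dropLast]; simp only [List.length_cons] at h1 ⊢; omega
            have hld2 : 2 ≤ ((a :: b :: t).dropLast).length := by
              rw [List.length_dropLast]; simp only [List.length_cons] at hlen3 ⊢; omega
            rw [ih (b :: t) hlt hlt2, ih _ hld hld2]
            have hstep := alt_step a (b :: t) (by simp)
              (by simp only [List.length_cons] at hsw hle ⊢; omega)
            rw [hstep]

-- ===== VERDICT (by name: the statement is the Claim_ definition above) =====
theorem get_max_switching_array_spec : Claim_equal_get_max_switching_array := by
  intro A _ hpre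
  unfold Spec_get_max_switching_array
  exact main_aux A.length A (le_refl _) hpre
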